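-- pv_equiv track=rewrite | github.com/lichkingwulaa/Codewars | 5 kyu/5_kyu_Josephus_Survivor.py | josephus_survivor
-- ===== SOURCE A (Python) =====
-- def josephus_survivor(n,k):
-- 	items = list(range(n))
-- 	res = []
-- 	i = k - 1
-- 	while items:
-- 		i = i % len(items)
-- 		res.append(items.pop(i))
-- 		i += (k - 1)
-- 	return res[-1] + 1
-- ===== SOURCE B (Python) =====
-- def josephus_survivor(n, k):
--     r = 0
--     for i in range(2, n + 1):
--         r = (r + k) % i
--     return r + 1
-- ===== Notes on version B (the rewrite author's own statement) =====
-- stated objective: faster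
-- what changed: Replaces the O(n^2) list simulation (repeated items.pop at a moving index) by the classic O(n) Josephus linear recurrence r = (r + k) % i for i = 2..n.
import Mathlib
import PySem

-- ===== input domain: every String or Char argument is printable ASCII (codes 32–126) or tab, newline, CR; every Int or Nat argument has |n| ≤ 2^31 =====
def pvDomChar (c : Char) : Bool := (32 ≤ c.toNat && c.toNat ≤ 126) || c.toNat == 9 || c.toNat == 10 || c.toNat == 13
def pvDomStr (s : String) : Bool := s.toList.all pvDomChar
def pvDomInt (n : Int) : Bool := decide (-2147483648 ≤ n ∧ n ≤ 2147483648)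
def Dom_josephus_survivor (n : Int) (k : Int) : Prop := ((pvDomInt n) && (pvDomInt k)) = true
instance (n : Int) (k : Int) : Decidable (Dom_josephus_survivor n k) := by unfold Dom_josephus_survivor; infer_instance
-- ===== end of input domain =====

-- B replaces A's O(n^2) pop-simulation by the linear Josephus recurrence r = (r+k) % i.

-- ===== PORT A =====
-- the while loop: items/i/res are the loop state; res collects the popped elements
def josephus_loop (k : Int) : List Int → Int → List Int → List Int
  | items, i, res =>
    if hne : items = [] then res
    else
      -- i = i % len(items); items.pop(i); i += (k - 1)
      match hp : PySem.List.pop? items (PySem.Int.mod i items.length) with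
      | some (x, rest) => josephus_loop k rest (PySem.Int.mod i items.length + (k - 1)) (res ++ [x])
      | none => res
termination_by items => items.length
decreasing_by
  have h := PySem.List.length_of_pop?_eq_some items hp
  simp at h
  omega

def josephus_survivor (n : Int) (k : Int) : Int :=
  let items := PySem.List.pyRange 0 n 1
  let res := josephus_loop k items (k - 1) []
  -- res[-1] + 1; res[-1] raises IndexError when res is empty (n ≤ 0), excluded by Pre_
  match PySem.List.pyGet? res (-1) with
  | some v => v + 1
  | none => 0

-- ===== PORT B =====
def josephus_survivor_alt (n : Int) (k : Int) : Int :=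
  (PySem.List.pyRange 2 (n + 1) 1).foldl (fun r i => PySem.Int.mod (r + k) i) 0 + 1

-- ===== PRECONDITION & SPEC =====
-- A raises IndexError (res[-1] on empty res) when n ≤ 0; excluded.
def Pre_josephus_survivor (n : Int) (k : Int) : Prop := 1 ≤ n
instance (n : Int) (k : Int) : Decidable (Pre_josephus_survivor n k) := by unfold Pre_josephus_survivor; infer_instance
def pvWitness_josephus_survivor : Int × Int := (7, 3)

def Spec_josephus_survivor (n : Int) (k : Int) (out : Int) : Prop := out = josephus_survivor_alt n k
instance (n : Int) (k : Int) (out : Int) : Decidable (Spec_josephus_survivor n k out) := by unfold Spec_josephus_survivor; infer_instance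

-- ===== CLAIM (what is proved, stated in full; the proofs are below) =====
def Claim_equal_josephus_survivor : Prop := ∀ (n : Int) (k : Int), Dom_josephus_survivor n k → Pre_josephus_survivor n k → Spec_josephus_survivor n k (josephus_survivor n k)

-- ===== LEMMAS AND PROOFS =====

-- the Josephus recurrence value, indexed by the circle size
def jf (k : Int) : Nat → Int
  | 0 => 0
  | 1 => 0
  | (m + 2) => PySem.Int.mod (jf k (m + 1) + k) ((m : Int) + 2)

lemma jf_bounds (k : Int) (m : Nat) (hm : 1 ≤ m) : 0 ≤ jf k m ∧ jf k m < (m : Int) := by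
  match m, hm with
  | 1, _ => simp [jf]
  | (m + 2), _ =>
    constructor
    · exact PySem.Int.mod_nonneg _ (by push_cast; omega)
    · push_cast
      exact PySem.Int.mod_lt _ (by omega)

lemma pyGet_append_neg_one (xs : List Int) (a : Int) :
    PySem.List.pyGet? (xs ++ [a]) (-1) = some a := by
  simp [PySem.List.pyGet?, PySem.List.pyIdx?]

lemma getD_eraseIdx (l : List Int) (p j : Nat) (hp : p < l.length) :
    (l.eraseIdx p).getD j 0 = if j < p then l.getD j 0 else l.getD (j + 1) 0 := by
  rw [List.getD_eq_getElem?_getD, List.getElem?_eraseIdx]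
  split_ifs <;> rw [List.getD_eq_getElem?_getD]

lemma josephus_loop_nil (k : Int) (i : Int) (res : List Int) :
    josephus_loop k [] i res = res := by
  rw [josephus_loop]
  simp

lemma josephus_loop_cons (k : Int) (l : List Int) (hne : l ≠ []) (i : Int) (res : List Int)
    (x : Int) (rest : List Int)
    (hp : PySem.List.pop? l (PySem.Int.mod i (l.length : Int)) = some (x, rest)) :
    josephus_loop k l i res
      = josephus_loop k rest (PySem.Int.mod i (l.length : Int) + (k - 1)) (res ++ [x]) := by
  rw [josephus_loop]
  rw [dif_neg hne]
  split
  · rename_i x' rest' h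
    rw [hp] at h
    injection h with h
    injection h with h1 h2
    subst h1; subst h2
    rfl
  · rename_i h
    rw [hp] at h
    simp at h

lemma loop_last (k : Int) (m : Nat) (hm : 0 < m) :
    ∀ (l : List Int), l.length = m → ∀ (i : Int) (res : List Int),
    PySem.List.pyGet? (josephus_loop k l i res) (-1) =
      some (l.getD (PySem.Int.mod (i - (k - 1) + jf k m) (m : Int)).toNat 0) := by
  induction m using Nat.strong_induction_on with
  | _ m IH =>
  intro l hl i res
  have hne : l ≠ [] := by intro h; subst h; simp at hl; omega
  have hMpos : (0 : Int) < (l.length : Int) := by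
    have : 0 < l.length := List.length_pos_iff.mpr hne
    exact_mod_cast this
  have h0 : 0 ≤ PySem.Int.mod i (l.length : Int) := PySem.Int.mod_nonneg i hMpos
  have h1 : PySem.Int.mod i (l.length : Int) < (l.length : Int) := PySem.Int.mod_lt i hMpos
  set i' := PySem.Int.mod i (l.length : Int) with hi'
  set p := i'.toNat with hpdef
  have hpc : (p : Int) = i' := Int.toNat_of_nonneg h0
  have hplt : p < l.length := by omega
  have hp : PySem.List.pop? l i' = some (l[p], l.eraseIdx p) := by
    rw [← hpc]; exact PySem.List.pop?_natCast l p hplt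
  have hiemod : i' = i % (l.length : Int) := by
    rw [hi', PySem.Int.mod_eq_emod_of_pos hMpos]
  rw [josephus_loop_cons k l hne i res _ _ hp]
  match m, hm, hl with
  | 1, _, hl =>
    have hrest : l.eraseIdx p = [] := by
      have := List.length_eraseIdx_of_lt hplt
      exact List.eq_nil_of_length_eq_zero (by omega)
    rw [hrest, josephus_loop_nil, pyGet_append_neg_one]
    have hp0 : p = 0 := by omega
    have hmod1 : PySem.Int.mod (i - (k - 1) + jf k 1) (1 : Int) = 0 := by
      have ha := PySem.Int.mod_nonneg (i - (k - 1) + jf k 1) (b := 1) (by omega)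
      have hb := PySem.Int.mod_lt (i - (k - 1) + jf k 1) (b := 1) (by omega)
      omega
    simp only [Nat.cast_one] at *
    rw [hmod1]
    simp [hp0, List.getD_eq_getElem?_getD, List.getElem?_eq_getElem (show 0 < l.length by omega)]
  | (m' + 2), _, hl =>
    have hrlen : (l.eraseIdx p).length = m' + 1 := by
      have := List.length_eraseIdx_of_lt hplt
      omega
    rw [IH (m' + 1) (by omega) (by omega) (l.eraseIdx p) hrlen (i' + (k - 1)) (res ++ [l[p]])]
    congr 1
    -- arithmetic core
    have hg := jf_bounds k (m' + 1) (by omega)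
    set g := jf k (m' + 1) with hgdef
    set N : Int := (m' : Int) + 2 with hN
    have hlcast : (l.length : Int) = N := by rw [hN]; exact_mod_cast congrArg (Nat.cast (R := Int)) hl
    have hjf2 : jf k (m' + 2) = PySem.Int.mod (g + k) N := by rw [jf]
    have hq : PySem.Int.mod (i' + (k - 1) - (k - 1) + g) ((m' + 1 : Nat) : Int)
        = (i' + g) % (N - 1) := by
      rw [PySem.Int.mod_eq_emod_of_pos (by push_cast; omega)]
      congr 1 <;> push_cast <;> ring
    have ht : PySem.Int.mod (i - (k - 1) + jf k (m' + 2)) ((m' + 2 : Nat) : Int)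
        = (i' + 1 + g) % N := by
      rw [hjf2, PySem.Int.mod_eq_emod_of_pos (by push_cast [hN]; omega),
          PySem.Int.mod_eq_emod_of_pos (by rw [hN]; omega)]
      have hcast : ((m' + 2 : Nat) : Int) = N := by rw [hN]; push_cast; ring
      rw [hcast]
      have hii : i % N = i' := by rw [hiemod, hlcast]
      calc (i - (k - 1) + (g + k) % N) % N
          = ((i - (k - 1)) % N + ((g + k) % N) % N) % N := by rw [Int.add_emod]
        _ = ((i - (k - 1)) % N + (g + k) % N) % N := by
              rw [Int.emod_emod_of_dvd _ dvd_rfl]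
        _ = (i - (k - 1) + (g + k)) % N := by rw [← Int.add_emod]
        _ = (i + (1 + g)) % N := by ring_nf
        _ = (i % N + (1 + g) % N) % N := by rw [Int.add_emod]
        _ = (i' + 1 + g) % N := by
              rw [hii, Int.add_emod, Int.emod_emod_of_dvd _ dvd_rfl, ← Int.add_emod]; ring_nf
    rw [hq, ht]
    have hgN : 0 ≤ g ∧ g ≤ N - 2 := by constructor <;> [exact hg.1; (push_cast [hN] at hg ⊢; omega)]
    have hi'N : 0 ≤ i' ∧ i' < N := by rw [← hlcast]; exact ⟨h0, h1⟩
    by_cases hc : i' + 1 + g < N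
    · have ht2 : (i' + 1 + g) % N = i' + 1 + g := Int.emod_eq_of_lt (by omega) hc
      have hq2 : (i' + g) % (N - 1) = i' + g := Int.emod_eq_of_lt (by omega) (by omega)
      rw [ht2, hq2, getD_eraseIdx l p (i' + g).toNat hplt, if_neg (by omega)]
      congr 1
      omega
    · have ht2 : (i' + 1 + g) % N = i' + 1 + g - N := by
        rw [← Int.sub_emod_right (i' + 1 + g) N]
        exact Int.emod_eq_of_lt (by omega) (by omega)
      have hq2 : (i' + g) % (N - 1) = i' + g - (N - 1) := by
        rw [← Int.sub_emod_right (i' + g) (N - 1)]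
        exact Int.emod_eq_of_lt (by omega) (by omega)
      rw [ht2, hq2, getD_eraseIdx l p (i' + g - (N - 1)).toNat hplt, if_pos (by omega)]
      congr 1
      omega

lemma fold_eq_jf (k : Int) (m : Nat) :
    (PySem.List.pyRange 2 ((m : Int) + 2) 1).foldl (fun r i => PySem.Int.mod (r + k) i) 0
      = jf k (m + 1) := by
  induction m with
  | zero =>
    norm_num [PySem.List.pyRange_one_eq_nil (by omega : (2 : Int) ≤ 2), jf]
  | succ m ih =>
    have hc : ((m + 1 : Nat) : Int) + 2 = ((m : Int) + 2) + 1 := by push_cast; ring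
    rw [hc, PySem.List.pyRange_one_succ_right (by omega), List.foldl_append, ih]
    simp only [List.foldl]
    rw [jf]

-- ===== VERDICT (by name: the statement is the Claim_ definition above) =====
theorem josephus_survivor_spec : Claim_equal_josephus_survivor := by
  unfold Claim_equal_josephus_survivor
  intro n k _ hpre
  unfold Pre_josephus_survivor at hpre
  unfold Spec_josephus_survivor josephus_survivor josephus_survivor_alt
  dsimp only
  obtain ⟨m, rfl⟩ : ∃ m : Nat, n = (m : Int) + 1 :=
    ⟨(n - 1).toNat, by omega⟩
  have hlen : (PySem.List.pyRange 0 ((m : Int) + 1) 1).length = m + 1 := by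
    rw [PySem.List.length_pyRange_one]; omega
  rw [loop_last k (m + 1) (by omega) _ hlen (k - 1) []]
  have hg := jf_bounds k (m + 1) (by omega)
  have harg : k - 1 - (k - 1) + jf k (m + 1) = jf k (m + 1) := by ring
  rw [harg, PySem.Int.mod_eq_emod_of_pos (by push_cast; omega),
      Int.emod_eq_of_lt hg.1 (by push_cast; omega)]
  have hidx : (jf k (m + 1)).toNat < (PySem.List.pyRange 0 ((m : Int) + 1) 1).length := by
    rw [hlen]; omega
  have hget : (PySem.List.pyRange 0 ((m : Int) + 1) 1).getD (jf k (m + 1)).toNat 0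
      = jf k (m + 1) := by
    rw [List.getD_eq_getElem?_getD, List.getElem?_eq_getElem hidx,
        PySem.List.getElem_pyRange_one]
    simp
    omega
  rw [hget]
  have hb : ((m : Int) + 1) + 1 = (m : Int) + 2 := by ring
  rw [hb, fold_eq_jf k m]
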